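-- pv_equiv track=rewrite | github.com/lsh23/algorithm-exercise | BFS/맥주마시면서걸어가기.py | solve
-- ===== SOURCE A (Python) =====
-- from collections import deque
--
-- def solve(n: int, s_y: int, s_x: int, f_y: int, f_x: int, convenience: list[tuple[int, int]]) -> str:
--     convenience.sort()
--     visited: list[int] = [0] * len(convenience)
--     q: deque[tuple[int, int]] = deque()
--     q.append((s_y, s_x))
--
--     while q:
--         y, x = q.popleft()
--
--         if abs(f_y - y) + abs(f_x - x) <= 1000:
--             return "happy"
--
--         for i in range(len(convenience)):
--
--             if visited[i] != 0:
--                 continue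
--
--             c_y, c_x = convenience[i]
--
--             if abs(c_y - y) + abs(c_x - x) <= 1000:
--                 visited[i] = 1
--                 q.append((c_y, c_x))
--
--     return "sad"
-- ===== SOURCE B (Python) =====
-- def solve(n: int, s_y: int, s_x: int, f_y: int, f_x: int, convenience: list[tuple[int, int]]) -> str:
--     convenience.sort()  # kept for A's observable in-place-sort side effect
--     s = (s_y, s_x)
--     f = (f_y, f_x)
--
--     def near(a, b):
--         return abs(a[0] - b[0]) + abs(a[1] - b[1]) <= 1000
--
--     # fixpoint iteration: grow the set of reachable stores until it is closed
--     reach = [near(s, c) for c in convenience]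
--     while True:
--         new = [r or any(rj and near(cj, c) for cj, rj in zip(convenience, reach))
--                for c, r in zip(convenience, reach)]
--         if new == reach:
--             break
--         reach = new
--
--     if near(s, f) or any(r and near(c, f) for c, r in zip(convenience, reach)):
--         return "happy"
--     return "sad"
-- ===== Notes on version B (the rewrite author's own statement) =====
-- stated objective: alternative
-- what changed: Replaces the BFS queue/visited-array traversal by a global fixpoint iteration: repeatedly saturate a boolean reachability vector over the stores until it stops changing, then test the finish against the start and the saturated set.
import Mathlib
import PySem

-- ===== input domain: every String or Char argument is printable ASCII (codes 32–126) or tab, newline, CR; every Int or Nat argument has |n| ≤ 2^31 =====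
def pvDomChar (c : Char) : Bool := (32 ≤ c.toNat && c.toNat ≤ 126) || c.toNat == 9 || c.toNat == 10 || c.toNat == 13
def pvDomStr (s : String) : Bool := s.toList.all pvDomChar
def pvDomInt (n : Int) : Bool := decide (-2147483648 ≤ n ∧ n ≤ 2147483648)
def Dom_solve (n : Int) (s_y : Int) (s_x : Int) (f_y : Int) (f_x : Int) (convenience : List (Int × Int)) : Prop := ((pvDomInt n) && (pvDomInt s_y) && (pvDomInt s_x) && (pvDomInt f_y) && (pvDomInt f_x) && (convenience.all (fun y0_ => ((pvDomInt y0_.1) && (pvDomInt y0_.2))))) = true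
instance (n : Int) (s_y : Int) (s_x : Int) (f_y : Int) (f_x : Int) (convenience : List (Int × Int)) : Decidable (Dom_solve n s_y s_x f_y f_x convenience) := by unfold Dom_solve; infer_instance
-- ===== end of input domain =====

-- B replaces A's BFS (queue + visited flags) by a fixpoint iteration saturating a boolean
-- reachability vector; same return value (both Pythons also sort `convenience` in place).


-- ===== PORT A =====

-- abs(a0 - b0) + abs(a1 - b1) <= 1000  (shared helper; both Pythons compute it the same way)
def near (a b : Int × Int) : Bool := decide ((a.1 - b.1).natAbs + (a.2 - b.2).natAbs ≤ 1000)

-- A's inner `for i in range(len(convenience))` loop: walks the stores together with their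
-- visited flags; returns the updated flags and the newly enqueued stores (in index order).
def scanA (cs : List (Int × Int)) (v : List Int) (p : Int × Int) : List Int × List (Int × Int) :=
  match cs, v with
  | [], v => (v, [])
  | _ :: _, [] => ([], [])
  | c :: cs, b :: bs =>
    let r := scanA cs bs p
    if b ≠ 0 then (b :: r.1, r.2)
    else if near c p then (1 :: r.1, c :: r.2)
    else (b :: r.1, r.2)

-- termination-measure fact for bfsA (cited in its decreasing_by)
theorem scanA_count (cs : List (Int × Int)) (v : List Int) (p : Int × Int) :
    (scanA cs v p).1.count 0 + (scanA cs v p).2.length = v.count 0 := by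
  induction cs generalizing v with
  | nil => simp [scanA]
  | cons c cs ih =>
    cases v with
    | nil => simp [scanA]
    | cons b bs =>
      have h := ih bs
      by_cases hb : b = 0 <;> by_cases hn : near c p <;>
        simp [scanA, hb, hn, List.count_cons] <;> omega

-- A's `while q:` loop
def bfsA (f : Int × Int) (conv : List (Int × Int)) : List (Int × Int) → List Int → String
  | [], _ => "sad"
  | p :: rest, v =>
    if near f p then "happy"
    else
      let sc := scanA conv v p
      bfsA f conv (rest ++ sc.2) sc.1
termination_by q v => 2 * v.count 0 + q.length
decreasing_by
  have h := scanA_count conv v p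
  simp only [List.length_append, List.length_cons]
  omega

def solve (n : Int) (s_y : Int) (s_x : Int) (f_y : Int) (f_x : Int) (convenience : List (Int × Int)) : String :=
  let conv := PySem.List.sorted2 convenience Prod.fst Prod.snd
  bfsA (f_y, f_x) conv [(s_y, s_x)] (List.replicate conv.length 0)

-- ===== PORT B =====

-- any(rj and near(cj, c) for cj, rj in zip(convenience, reach))
def hopB (conv : List (Int × Int)) (r : List Bool) (c : Int × Int) : Bool :=
  (conv.zip r).any (fun q => q.2 && near q.1 c)

-- one saturation pass: new = [r or any(...) for c, r in zip(convenience, reach)]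
def nextR (conv : List (Int × Int)) (r : List Bool) : List Bool :=
  (conv.zip r).map (fun q => q.2 || hopB conv r q.1)

-- termination facts for satB (cited in its decreasing_by)
theorem mapzip_count_le (g : Int × Int → Bool) (cs : List (Int × Int)) (r : List Bool) :
    ((cs.zip r).map (fun q => q.2 || g q.1)).count false ≤ r.count false := by
  induction cs generalizing r with
  | nil => simp
  | cons c cs ih =>
    cases r with
    | nil => simp
    | cons b bs =>
      have h := ih bs
      cases b <;> cases hg : g c <;> simp [List.count_cons, hg] <;> omega

theorem mapzip_count_lt (g : Int × Int → Bool) (cs : List (Int × Int)) (r : List Bool)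
    (hlen : r.length ≤ cs.length) (hne : (cs.zip r).map (fun q => q.2 || g q.1) ≠ r) :
    ((cs.zip r).map (fun q => q.2 || g q.1)).count false < r.count false := by
  induction cs generalizing r with
  | nil => cases r with
    | nil => simp at hne
    | cons b bs => simp at hlen
  | cons c cs ih =>
    cases r with
    | nil => simp at hne
    | cons b bs =>
      cases b with
      | true =>
        have hne' : (cs.zip bs).map (fun q => q.2 || g q.1) ≠ bs := by
          intro h; apply hne; simp [h]
        have := ih bs (by simpa using hlen) hne'
        simp [List.count_cons]; omega
      | false =>
        by_cases hg : g c = true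
        · have := mapzip_count_le g cs bs
          simp [List.count_cons, hg]; omega
        · have hg' : g c = false := by simpa using hg
          have hne' : (cs.zip bs).map (fun q => q.2 || g q.1) ≠ bs := by
            intro h; apply hne; simp [h, hg']
          have := ih bs (by simpa using hlen) hne'
          simp [List.count_cons, hg']; omega

-- B's `while True:` loop: iterate the pass until nothing changes
def satB (conv : List (Int × Int)) (r : List Bool) : List Bool :=
  if h : nextR conv r = r then r else satB conv (nextR conv r)
termination_by (r.length, r.count false)
decreasing_by
  rcases Nat.lt_or_ge (nextR conv r).length r.length with hl | hl
  · exact Prod.Lex.left _ _ hl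
  · have hmin : (nextR conv r).length = min conv.length r.length := by
      simp [nextR, hopB]
    have hle : r.length ≤ conv.length := by omega
    have heq : (nextR conv r).length = r.length := by omega
    rw [heq]
    exact Prod.Lex.right _ (mapzip_count_lt _ conv r hle h)

def solve_alt (n : Int) (s_y : Int) (s_x : Int) (f_y : Int) (f_x : Int) (convenience : List (Int × Int)) : String :=
  let conv := PySem.List.sorted2 convenience Prod.fst Prod.snd
  let s : Int × Int := (s_y, s_x)
  let f : Int × Int := (f_y, f_x)
  let r := satB conv (conv.map (fun c => near s c))
  if near s f || (conv.zip r).any (fun q => q.2 && near q.1 f) then "happy" else "sad"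

-- ===== PRECONDITION & SPEC =====
def Spec_solve (n : Int) (s_y : Int) (s_x : Int) (f_y : Int) (f_x : Int) (convenience : List (Int × Int)) (out : String) : Prop := out = solve_alt n s_y s_x f_y f_x convenience
instance (n : Int) (s_y : Int) (s_x : Int) (f_y : Int) (f_x : Int) (convenience : List (Int × Int)) (out : String) : Decidable (Spec_solve n s_y s_x f_y f_x convenience out) := by unfold Spec_solve; infer_instance

-- ===== CLAIM (what is proved, stated in full; the proofs are below) =====
def Claim_equal_solve : Prop := ∀ (n : Int) (s_y : Int) (s_x : Int) (f_y : Int) (f_x : Int) (convenience : List (Int × Int)), Dom_solve n s_y s_x f_y f_x convenience → Spec_solve n s_y s_x f_y f_x convenience (solve n s_y s_x f_y f_x convenience)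

-- ===== LEMMAS AND PROOFS =====

theorem near_comm (a b : Int × Int) : near a b = near b a := by
  simp only [near]
  congr 1
  rw [← Int.natAbs_neg (a.1 - b.1), ← Int.natAbs_neg (a.2 - b.2), neg_sub, neg_sub]

-- reachability from a frontier Q through a pool U of available stores:
-- the common mathematical content of A's BFS and B's fixpoint iteration
inductive RchL (U : List (Int × Int)) (Q : List (Int × Int)) : Int × Int → Prop
  | base {p} (hp : p ∈ Q) : RchL U Q p
  | step {b c} (hb : RchL U Q b) (hc : c ∈ U) (hn : near c b = true) : RchL U Q c

theorem rchL_nil {U : List (Int × Int)} {p : Int × Int} (h : RchL U [] p) : False := by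
  induction h with
  | base hp => simp at hp
  | step _ _ _ ih => exact ih

-- the unvisited stores of a visited vector
def unvis (cs : List (Int × Int)) (v : List Int) : List (Int × Int) :=
  ((cs.zip v).filter (fun q => q.2 == 0)).map Prod.fst

theorem scanA_news (cs : List (Int × Int)) (v : List Int) (p : Int × Int) :
    (scanA cs v p).2 = (unvis cs v).filter (fun c => near c p) := by
  induction cs generalizing v with
  | nil => simp [scanA, unvis]
  | cons c cs ih =>
    cases v with
    | nil => simp [scanA, unvis]
    | cons b bs =>
      by_cases hb : b = 0 <;> by_cases hn : near c p <;>
        simp [scanA, unvis, hb, hn, ih]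

theorem scanA_unvis (cs : List (Int × Int)) (v : List Int) (p : Int × Int) :
    unvis cs (scanA cs v p).1 = (unvis cs v).filter (fun c => !near c p) := by
  induction cs generalizing v with
  | nil => simp [scanA, unvis]
  | cons c cs ih =>
    cases v with
    | nil => simp [scanA, unvis]
    | cons b bs =>
      by_cases hb : b = 0 <;> by_cases hn : near c p <;>
        simp [scanA, unvis, hb, hn] <;> simp [unvis] at ih <;> simp [ih]

-- dequeueing y: reachability before the scan equals reachability after it
theorem rch_forward {U Q : List (Int × Int)} {y p : Int × Int}
    (h : RchL U (y :: Q) p) :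
    p = y ∨ RchL (U.filter (fun c => !near c y)) (Q ++ U.filter (fun c => near c y)) p := by
  induction h with
  | base hp =>
    rcases List.mem_cons.mp hp with h | h
    · exact Or.inl h
    · exact Or.inr (RchL.base (List.mem_append_left _ h))
  | step hb hc hn ih =>
    rename_i b c
    by_cases hcy : near c y = true
    · exact Or.inr (RchL.base (List.mem_append_right _ (List.mem_filter.mpr ⟨hc, by simp [hcy]⟩)))
    · rcases ih with rfl | hr
      · exact absurd hn hcy
      · exact Or.inr (RchL.step hr (List.mem_filter.mpr ⟨hc, by simp [hcy]⟩) hn)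

theorem rch_backward {U Q : List (Int × Int)} {y p : Int × Int}
    (h : RchL (U.filter (fun c => !near c y)) (Q ++ U.filter (fun c => near c y)) p) :
    RchL U (y :: Q) p := by
  induction h with
  | base hp =>
    rcases List.mem_append.mp hp with h | h
    · exact RchL.base (List.mem_cons_of_mem _ h)
    · rcases List.mem_filter.mp h with ⟨hU, hn⟩
      exact RchL.step (RchL.base (List.mem_cons_self)) hU (by simpa using hn)
  | step hb hc hn ih =>
    exact RchL.step ih (List.mem_filter.mp hc).1 hn

-- A's BFS answers "happy" exactly when some reachable point is near the finish
theorem bfsA_happy_iff (f : Int × Int) (conv : List (Int × Int)) :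
    ∀ (q : List (Int × Int)) (v : List Int),
      (bfsA f conv q v = "happy" ↔ ∃ p, RchL (unvis conv v) q p ∧ near f p = true) := by
  intro q v
  fun_induction bfsA f conv q v with
  | case1 v =>
    constructor
    · intro h; simp at h
    · rintro ⟨p, hp, -⟩; exact absurd hp rchL_nil
  | case2 p rest v h =>
    constructor
    · intro _; exact ⟨p, RchL.base (List.mem_cons_self), h⟩
    · intro _; rfl
  | case3 p rest v h sc ih =>
    rw [ih]
    have e2 : sc.2 = (unvis conv v).filter (fun c => near c p) := scanA_news conv v p
    have e1 : unvis conv sc.1 = (unvis conv v).filter (fun c => !near c p) := scanA_unvis conv v p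
    rw [e1, e2]
    constructor
    · rintro ⟨p', hr, hn⟩
      exact ⟨p', rch_backward hr, hn⟩
    · rintro ⟨p', hr, hn⟩
      rcases rch_forward hr with rfl | hr'
      · exact absurd hn (by simpa using h)
      · exact ⟨p', hr', hn⟩

theorem bfsA_happy_or_sad (f : Int × Int) (conv : List (Int × Int)) :
    ∀ (q : List (Int × Int)) (v : List Int),
      bfsA f conv q v = "happy" ∨ bfsA f conv q v = "sad" := by
  intro q v
  fun_induction bfsA f conv q v with
  | case1 => right; rfl
  | case2 p rest v h => left; rfl
  | case3 p rest v h sc ih => exact ih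

theorem unvis_replicate (cs : List (Int × Int)) :
    unvis cs (List.replicate cs.length 0) = cs := by
  induction cs with
  | nil => simp [unvis]
  | cons c cs ih => simpa [unvis, List.replicate_succ] using congrArg (List.cons c) (by simpa [unvis] using ih)

-- ===== B-side lemmas =====

theorem nextR_length (conv : List (Int × Int)) (r : List Bool) :
    (nextR conv r).length = min conv.length r.length := by
  simp [nextR]

theorem nextR_getElem (conv : List (Int × Int)) (r : List Bool) (i : Nat)
    (h : i < conv.length) (h' : i < r.length) :
    (nextR conv r)[i]'(by rw [nextR_length]; omega) = (r[i] || hopB conv r conv[i]) := by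
  simp [nextR]

theorem hopB_iff (conv : List (Int × Int)) (r : List Bool) (c : Int × Int) :
    hopB conv r c = true ↔
      ∃ j, ∃ (hj : j < conv.length) (hj' : j < r.length), r[j] = true ∧ near conv[j] c = true := by
  simp only [hopB, List.any_eq_true]
  constructor
  · rintro ⟨x, hx, hp⟩
    rcases List.mem_iff_getElem.mp hx with ⟨j, hj, hxe⟩
    have hj1 : j < conv.length := by
      have := hj; simp [List.length_zip] at this; omega
    have hj2 : j < r.length := by
      have := hj; simp [List.length_zip] at this; omega
    refine ⟨j, hj1, hj2, ?_, ?_⟩ <;>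
      · have : (conv.zip r)[j] = (conv[j], r[j]) := List.getElem_zip ..
        rw [this] at hxe
        subst hxe
        simp_all
  · rintro ⟨j, hj1, hj2, hr, hn⟩
    refine ⟨(conv[j], r[j]), ?_, by simp [hr, hn]⟩
    have : (conv.zip r)[j]'(by simp [List.length_zip]; omega) = (conv[j], r[j]) := List.getElem_zip ..
    exact this ▸ List.getElem_mem _

-- the loop invariant of satB: right length, only reachable stores marked, all stores near the start marked
def Good (conv : List (Int × Int)) (s : Int × Int) (r : List Bool) : Prop :=
  r.length = conv.length ∧
  (∀ i (h : i < conv.length) (h' : i < r.length), r[i] = true → RchL conv [s] conv[i]) ∧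
  (∀ i (h : i < conv.length) (h' : i < r.length), near s conv[i] = true → r[i] = true)

theorem good_init (conv : List (Int × Int)) (s : Int × Int) :
    Good conv s (conv.map (fun c => near s c)) := by
  refine ⟨by simp, ?_, ?_⟩
  · intro i h h' hr
    simp only [List.getElem_map] at hr
    exact RchL.step (b := s) (RchL.base (by simp)) (List.getElem_mem h) (by rw [near_comm]; exact hr)
  · intro i h h' hn
    simpa using hn

theorem good_next (conv : List (Int × Int)) (s : Int × Int) (r : List Bool)
    (hG : Good conv s r) : Good conv s (nextR conv r) := by
  obtain ⟨hlen, hsound, hbase⟩ := hG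
  have hlen' : (nextR conv r).length = conv.length := by rw [nextR_length, hlen]; omega
  refine ⟨hlen', ?_, ?_⟩
  · intro i h h' hr
    rw [nextR_getElem conv r i h (by omega)] at hr
    rcases Bool.or_eq_true_iff.mp hr with hr | hr
    · exact hsound i h (by omega) hr
    · rcases (hopB_iff conv r conv[i]).mp hr with ⟨j, hj1, hj2, hrj, hnj⟩
      exact RchL.step (hsound j hj1 hj2 hrj) (List.getElem_mem h) (by rw [near_comm]; exact hnj)
  · intro i h h' hn
    rw [nextR_getElem conv r i h (by omega)]
    simp [hbase i h (by omega) hn]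

theorem satB_good (conv : List (Int × Int)) (s : Int × Int) :
    ∀ (r : List Bool), Good conv s r →
      Good conv s (satB conv r) ∧ nextR conv (satB conv r) = satB conv r := by
  intro r hG
  fun_induction satB conv r with
  | case1 r h => exact ⟨hG, h⟩
  | case2 r h ih => exact ih (good_next conv s r hG)

-- at the fixpoint, every reachable point is the start or a marked store
theorem rch_complete (conv : List (Int × Int)) (s : Int × Int) (r : List Bool)
    (hG : Good conv s r) (hfix : nextR conv r = r) :
    ∀ p, RchL conv [s] p →
      p = s ∨ ∃ i, ∃ (h : i < conv.length), conv[i] = p ∧ ∃ (h' : i < r.length), r[i] = true := by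
  obtain ⟨hlen, hsound, hbase⟩ := hG
  have hclosed : ∀ i (h : i < conv.length) (h' : i < r.length),
      hopB conv r conv[i] = true → r[i] = true := by
    intro i h h' hh
    have hlen2 : i < (nextR conv r).length := by rw [nextR_length]; omega
    have h3 := nextR_getElem conv r i h h'
    rw [hh, Bool.or_true] at h3
    exact (List.getElem_of_eq hfix hlen2).symm.trans h3
  intro p hp
  induction hp with
  | base hp => simp at hp; exact Or.inl hp
  | step hb hc hn ih =>
    rename_i b c
    rcases List.mem_iff_getElem.mp hc with ⟨i, hi, hie⟩
    right
    refine ⟨i, hi, hie, by omega, ?_⟩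
    rcases ih with rfl | ⟨j, hj, hje, hj', hrj⟩
    · exact hbase i hi (by omega) (by rw [near_comm, hie]; exact hn)
    · refine hclosed i hi (by omega) ((hopB_iff conv r conv[i]).mpr ⟨j, hj, hj', hrj, ?_⟩)
      rw [hje, hie, near_comm]
      exact hn

-- B's final condition is true exactly when some reachable point is near the finish
theorem altcond_iff (conv : List (Int × Int)) (s f : Int × Int) :
    ((near s f || (conv.zip (satB conv (conv.map (fun c => near s c)))).any
        (fun q => q.2 && near q.1 f)) = true) ↔
      ∃ p, RchL conv [s] p ∧ near f p = true := by
  obtain ⟨hG, hfix⟩ := satB_good conv s _ (good_init conv s)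
  obtain ⟨hlen, hsound, hbase⟩ := hG
  set rf := satB conv (conv.map (fun c => near s c)) with hrf
  constructor
  · intro h
    rcases Bool.or_eq_true_iff.mp h with h | h
    · exact ⟨s, RchL.base (by simp), by rw [near_comm]; exact h⟩
    · rcases List.any_eq_true.mp h with ⟨x, hx, hp⟩
      rcases List.mem_iff_getElem.mp hx with ⟨j, hj, hxe⟩
      have hj1 : j < conv.length := by have := hj; simp [List.length_zip] at this; omega
      have hj2 : j < rf.length := by have := hj; simp [List.length_zip] at this; omega
      have : (conv.zip rf)[j] = (conv[j], rf[j]) := List.getElem_zip ..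
      rw [this] at hxe
      subst hxe
      simp only [Bool.and_eq_true] at hp
      exact ⟨conv[j], hsound j hj1 hj2 hp.1, by rw [near_comm]; exact hp.2⟩
  · rintro ⟨p, hp, hn⟩
    rcases rch_complete conv s rf ⟨hlen, hsound, hbase⟩ hfix p hp with rfl | ⟨i, hi, hie, hi', hri⟩
    · rw [near_comm] at hn
      simp [hn]
    · refine Bool.or_eq_true_iff.mpr (Or.inr (List.any_eq_true.mpr ⟨(conv[i], rf[i]), ?_, ?_⟩))
      · have : (conv.zip rf)[i]'(by simp [List.length_zip]; omega) = (conv[i], rf[i]) := List.getElem_zip ..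
        exact this ▸ List.getElem_mem _
      · simp only [Bool.and_eq_true]
        exact ⟨hri, by rw [hie, near_comm]; exact hn⟩

-- ===== VERDICT (by name: the statement is the Claim_ definition above) =====
theorem solve_spec : Claim_equal_solve := by
  intro n s_y s_x f_y f_x convenience _
  unfold Spec_solve solve solve_alt
  set conv := PySem.List.sorted2 convenience Prod.fst Prod.snd with hconv
  by_cases hH : ∃ p, RchL conv [(s_y, s_x)] p ∧ near (f_y, f_x) p = true
  · have hA : bfsA (f_y, f_x) conv [(s_y, s_x)] (List.replicate conv.length 0) = "happy" := by
      rw [bfsA_happy_iff, unvis_replicate]; exact hH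
    have hB := (altcond_iff conv (s_y, s_x) (f_y, f_x)).mpr hH
    simp only [hA, hB, if_pos]
  · have hA : bfsA (f_y, f_x) conv [(s_y, s_x)] (List.replicate conv.length 0) = "sad" := by
      rcases bfsA_happy_or_sad (f_y, f_x) conv [(s_y, s_x)] (List.replicate conv.length 0) with h | h
      · rw [bfsA_happy_iff, unvis_replicate] at h; exact absurd h hH
      · exact h
    have hB : ¬ ((near (s_y, s_x) (f_y, f_x) || (conv.zip (satB conv (conv.map (fun c => near (s_y, s_x) c)))).any (fun q => q.2 && near q.1 (f_y, f_x))) = true) := by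
      rw [altcond_iff]; exact hH
    simp only [hA, Bool.not_eq_true] at *
    rw [if_neg (by simp [hB])]
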